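-- pv_equiv track=rewrite | github.com/fantasiiio/GPT-Games | Blokus Duo/test.py | identify_corners_positions
-- ===== SOURCE A (Python) =====
-- def identify_corners_positions(grid, player_id, check_outer_edges=True):
--     corner_positions = []
--     rows = len(grid)
--     cols = len(grid[0])
--
--     for i in range(rows):
--         for j in range(cols):
--             if grid[i][j] == player_id:
--                 diagonals = [(i-1, j-1), (i-1, j+1), (i+1, j-1), (i+1, j+1)]
--                 for dx, dy in diagonals:
--                     if ((dx < 0 or dy < 0 or dx >= rows or dy >= cols)) or grid[dx][dy] == 0:
--                         edge_touch = False
--                         for ddx, ddy in [(0, 1), (1, 0), (0, -1), (-1, 0)]: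
--                             new_dx, new_dy = dx + ddx, dy + ddy
--                             if not((new_dx < 0 or new_dy < 0 or new_dx >= rows or new_dy >= cols)) and grid[new_dx][new_dy] == player_id:
--                                 edge_touch = True
--                                 break
--                         if not edge_touch:
--                             corner_positions.append((dx, dy))
--
--     # remove position where x oy y is outsize of the grid
--     new_list = []
--     if not check_outer_edges:
--         for i in range(len(corner_positions)):
--             if corner_positions[i][0] >= 0 and corner_positions[i][1] >= 0 and corner_positions[i][0] < rows and corner_positions[i][1] < cols:
--                 new_list.append(corner_positions[i])
--     else:
--         new_list = corner_positions
--
--     return list(set(new_list))  # Remove duplicates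
--
-- grid = [[0 for _ in range(10)] for _ in range(5)]
-- ===== SOURCE B (Python) =====
-- def identify_corners_positions(grid, player_id, check_outer_edges=True):
--     rows, cols = len(grid), len(grid[0])
--     # set algebra: occupied = support of the grid; blocked = player cells dilated by the
--     # orthogonal cross; a diagonal shift of a player cell qualifies iff it avoids both sets
--     occupied = {(i, j) for i, row in enumerate(grid) for j, v in enumerate(row[:cols]) if v != 0}
--     players = [(i, j) for i, row in enumerate(grid) for j, v in enumerate(row[:cols]) if v == player_id]
--     blocked = {(i + a, j + b) for i, j in players for a, b in ((0, 1), (1, 0), (0, -1), (-1, 0))}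
--     corners = [(i + a, j + b) for i, j in players for a, b in ((-1, -1), (-1, 1), (1, -1), (1, 1))
--                if (i + a, j + b) not in occupied and (i + a, j + b) not in blocked]
--     if not check_outer_edges:
--         corners = [(x, y) for x, y in corners if 0 <= x < rows and 0 <= y < cols]
--     return list(set(corners))
-- ===== Notes on version B (the rewrite author's own statement) =====
-- stated objective: alternative
-- what changed: B replaces A's nested per-cell neighbour probing (bounds tests plus an inner 4-way break scan of the grid around every diagonal) by set algebra computed up front: the grid's support set 'occupied' and the player cells dilated by the orthogonal cross ('blocked'); a diagonal shift of a player cell qualifies iff it lies in neither set, so no bounds check or grid lookup happens during emission.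
import Mathlib
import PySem

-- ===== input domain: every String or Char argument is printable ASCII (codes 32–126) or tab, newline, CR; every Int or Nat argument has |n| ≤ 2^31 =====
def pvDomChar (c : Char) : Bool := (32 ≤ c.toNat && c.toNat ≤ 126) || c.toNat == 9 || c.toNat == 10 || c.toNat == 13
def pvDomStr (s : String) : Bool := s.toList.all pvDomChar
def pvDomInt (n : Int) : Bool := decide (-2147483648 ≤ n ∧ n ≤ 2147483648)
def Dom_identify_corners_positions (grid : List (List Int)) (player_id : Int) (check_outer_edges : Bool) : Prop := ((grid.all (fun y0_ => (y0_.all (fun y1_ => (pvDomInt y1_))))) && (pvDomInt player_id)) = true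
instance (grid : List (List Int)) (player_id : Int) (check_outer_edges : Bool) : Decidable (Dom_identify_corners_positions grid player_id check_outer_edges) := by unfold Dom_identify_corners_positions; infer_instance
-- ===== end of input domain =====

-- B recasts A's per-cell neighbour probing as set algebra built up front (the grid's support set
-- and the player cells dilated by the orthogonal cross); same cost class, return value only.

-- ===== PORT A =====
def identify_corners_positions (grid : List (List Int)) (player_id : Int) (check_outer_edges : Bool) : List (Int × Int) :=
  let rows : Int := PySem.List.len grid
  let cols : Int := PySem.List.len (PySem.List.pyGetD grid 0 [])
  let corner_positions : List (Int × Int) :=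
    (PySem.List.pyRange 0 rows).foldl (fun acc i =>
      (PySem.List.pyRange 0 cols).foldl (fun acc j =>
        if PySem.List.pyGetD (PySem.List.pyGetD grid i []) j 0 == player_id then
          [(i-1, j-1), (i-1, j+1), (i+1, j-1), (i+1, j+1)].foldl (fun acc dd =>
            if (decide (dd.1 < 0) || decide (dd.2 < 0) || decide (rows ≤ dd.1) || decide (cols ≤ dd.2))
                || (PySem.List.pyGetD (PySem.List.pyGetD grid dd.1 []) dd.2 0 == 0) then
              let edge_touch : Bool :=
                [((0:Int), (1:Int)), (1, 0), (0, -1), (-1, 0)].any (fun dd2 =>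
                  !(decide (dd.1 + dd2.1 < 0) || decide (dd.2 + dd2.2 < 0)
                      || decide (rows ≤ dd.1 + dd2.1) || decide (cols ≤ dd.2 + dd2.2))
                  && (PySem.List.pyGetD (PySem.List.pyGetD grid (dd.1 + dd2.1) []) (dd.2 + dd2.2) 0 == player_id))
              if !edge_touch then acc ++ [dd] else acc
            else acc) acc
        else acc) acc) []
  let new_list : List (Int × Int) :=
    if !check_outer_edges then
      (PySem.List.pyRange 0 (PySem.List.len corner_positions)).foldl (fun acc k =>
        let p := PySem.List.pyGetD corner_positions k (0, 0)
        if decide (0 ≤ p.1) && decide (0 ≤ p.2) && decide (p.1 < rows) && decide (p.2 < cols) then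
          acc ++ [p]
        else acc) []
    else corner_positions
  PySem.Set.ofList new_list

-- ===== PORT B =====
-- cells of the (cols-truncated) grid whose value satisfies p, row-major (B's comprehension shape)
def pvCellsP (grid : List (List Int)) (p : Int → Bool) (cols : Int) : List (Int × Int) :=
  (PySem.List.enumerate grid).flatMap (fun ir =>
    (PySem.List.enumerate (PySem.List.slice ir.2 none (some cols))).filterMap (fun jv =>
      if p jv.2 then some (ir.1, jv.1) else none))

def identify_corners_positions_alt (grid : List (List Int)) (player_id : Int) (check_outer_edges : Bool) : List (Int × Int) :=
  let rows : Int := PySem.List.len grid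
  let cols : Int := PySem.List.len (PySem.List.pyGetD grid 0 [])
  let occupied : PySem.Set (Int × Int) := PySem.Set.ofList (pvCellsP grid (fun v => !(v == 0)) cols)
  let players : List (Int × Int) := pvCellsP grid (fun v => v == player_id) cols
  let blocked : PySem.Set (Int × Int) :=
    PySem.Set.ofList (players.flatMap (fun ij =>
      [((0:Int), (1:Int)), (1, 0), (0, -1), (-1, 0)].map (fun ab => (ij.1 + ab.1, ij.2 + ab.2))))
  let corners : List (Int × Int) :=
    players.flatMap (fun ij =>
      [((-1:Int), (-1:Int)), (-1, 1), (1, -1), (1, 1)].filterMap (fun ab =>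
        if !(occupied.contains (ij.1 + ab.1, ij.2 + ab.2))
            && !(blocked.contains (ij.1 + ab.1, ij.2 + ab.2)) then
          some (ij.1 + ab.1, ij.2 + ab.2)
        else none))
  let corners2 : List (Int × Int) :=
    if !check_outer_edges then
      corners.filter (fun p => decide (0 ≤ p.1) && decide (0 ≤ p.2) && decide (p.1 < rows) && decide (p.2 < cols))
    else corners
  PySem.Set.ofList corners2

-- ===== PRECONDITION & SPEC =====
-- Pre_ excludes exactly the inputs where the Python A raises: the empty grid (grid[0] is an
-- IndexError) and grids with a row shorter than the first row (grid[i][j] is an IndexError).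
def Pre_identify_corners_positions (grid : List (List Int)) (player_id : Int) (check_outer_edges : Bool) : Prop :=
  grid ≠ [] ∧ ∀ row ∈ grid, (PySem.List.pyGetD grid 0 []).length ≤ row.length
instance (grid : List (List Int)) (player_id : Int) (check_outer_edges : Bool) : Decidable (Pre_identify_corners_positions grid player_id check_outer_edges) := by unfold Pre_identify_corners_positions; infer_instance

def pvWitness_identify_corners_positions : List (List Int) × Int × Bool := ([[1, 0], [0, 0]], 1, true)

def Spec_identify_corners_positions (grid : List (List Int)) (player_id : Int) (check_outer_edges : Bool) (out : List (Int × Int)) : Prop := out = identify_corners_positions_alt grid player_id check_outer_edges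
instance (grid : List (List Int)) (player_id : Int) (check_outer_edges : Bool) (out : List (Int × Int)) : Decidable (Spec_identify_corners_positions grid player_id check_outer_edges out) := by unfold Spec_identify_corners_positions; infer_instance

-- ===== CLAIM (what is proved, stated in full; the proofs are below) =====
def Claim_equal_identify_corners_positions : Prop := ∀ (grid : List (List Int)) (player_id : Int) (check_outer_edges : Bool), Dom_identify_corners_positions grid player_id check_outer_edges → Pre_identify_corners_positions grid player_id check_outer_edges → Spec_identify_corners_positions grid player_id check_outer_edges (identify_corners_positions grid player_id check_outer_edges)

-- ===== LEMMAS AND PROOFS =====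

theorem pv_witness_ok : Dom_identify_corners_positions pvWitness_identify_corners_positions.1 pvWitness_identify_corners_positions.2.1 pvWitness_identify_corners_positions.2.2 ∧ Pre_identify_corners_positions pvWitness_identify_corners_positions.1 pvWitness_identify_corners_positions.2.1 pvWitness_identify_corners_positions.2.2 := by
  constructor <;> decide

theorem pyGetD_cons_pos {α : Type} (x : α) (xs : List α) (i : Int) (d : α) (h : 0 < i) :
    PySem.List.pyGetD (x :: xs) i d = PySem.List.pyGetD xs (i - 1) d := by
  rw [PySem.List.pyGetD_of_nonneg _ d (by omega), PySem.List.pyGetD_of_nonneg _ d (by omega)]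
  have : i.toNat = (i - 1).toNat + 1 := by omega
  rw [this]; rfl

theorem pv_flatMap_congr_mem {α β : Type} (l : List α) (f g : α → List β)
    (h : ∀ x ∈ l, f x = g x) : l.flatMap f = l.flatMap g := by
  induction l with
  | nil => rfl
  | cons x xs ih =>
    simp only [List.flatMap_cons]
    rw [h x (by simp), ih (fun y hy => h y (by simp [hy]))]

-- index loop over a list with its index = loop over enumerate
theorem pv_flatMap_enum {α β : Type} (xs : List α) (d : α) (f : Int → α → List β) (s : Int) :
    (PySem.List.pyRange s (s + PySem.List.len xs)).flatMap (fun i => f i (PySem.List.pyGetD xs (i - s) d))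
      = (PySem.List.enumerate xs s).flatMap (fun p => f p.1 p.2) := by
  induction xs generalizing s with
  | nil =>
    simp [PySem.List.enumerate]
  | cons x xs ih =>
    have hlen : (PySem.List.len (x :: xs) : Int) = PySem.List.len xs + 1 := by
      simp [PySem.List.len]
    have hnn : (0:Int) ≤ PySem.List.len xs := by
      simp [PySem.List.len]
    rw [PySem.List.pyRange_one_cons (by omega), PySem.List.enumerate_cons]
    simp only [List.flatMap_cons]
    have h1 : PySem.List.pyGetD (x :: xs) (s - s) d = x := by
      simp [PySem.List.pyGetD_zero_cons]
    rw [h1]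
    congr 1
    have h2 : s + PySem.List.len (x :: xs) = (s + 1) + PySem.List.len xs := by omega
    rw [h2, pv_flatMap_congr_mem _ _ (fun i => f i (PySem.List.pyGetD xs (i - (s+1)) d)) ?_, ih (s+1)]
    intro i hi
    have hi' := PySem.List.mem_pyRange_one.mp hi
    rw [pyGetD_cons_pos _ _ _ _ (by omega)]
    have : i - s - 1 = i - (s + 1) := by omega
    rw [this]

theorem pv_flatMap_enum0 {α β : Type} (xs : List α) (d : α) (f : Int → α → List β) :
    (PySem.List.pyRange 0 (PySem.List.len xs)).flatMap (fun i => f i (PySem.List.pyGetD xs i d))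
      = (PySem.List.enumerate xs).flatMap (fun p => f p.1 p.2) := by
  have h := pv_flatMap_enum xs d f 0
  simpa using h

theorem pv_filterMap_eq_flatMap {α β : Type} (p : α → Bool) (f : α → β) (l : List α) :
    l.filterMap (fun x => if p x then some (f x) else none)
      = l.flatMap (fun x => if p x then [f x] else []) := by
  induction l with
  | nil => rfl
  | cons x xs ih =>
    by_cases h : p x <;> simp [h, ih]

theorem pv_filterMap_filter {α : Type} (p : α → Bool) (l : List α) :
    l.filterMap (fun x => if p x then some x else none) = l.filter p := by
  induction l with
  | nil => rfl
  | cons x xs ih =>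
    by_cases h : p x <;> simp [h, ih]

theorem pv_tag {α β γ : Type} (p : α → Bool) (h : α → γ) (g : γ → List β) (l : List α) :
    l.flatMap (fun x => if p x then g (h x) else [])
      = (l.flatMap (fun x => if p x then [h x] else [])).flatMap g := by
  induction l with
  | nil => rfl
  | cons x xs ih =>
    by_cases hp : p x <;> simp [hp, ih]

-- the row-major qualifying-cell list in A's traversal order (range form)
def pvCellsR (grid : List (List Int)) (p : Int → Bool) (rows cols : Int) : List (Int × Int) :=
  (PySem.List.pyRange 0 rows).flatMap (fun i =>
    (PySem.List.pyRange 0 cols).flatMap (fun j =>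
      if p (PySem.List.pyGetD (PySem.List.pyGetD grid i []) j 0) then [(i, j)] else []))

theorem pv_row_eq (row : List Int) (p : Int → Bool) (cols : Int) (i : Int)
    (hc0 : 0 ≤ cols) (hr : cols ≤ (row.length : Int)) :
    (PySem.List.pyRange 0 cols).flatMap (fun j =>
        if p (PySem.List.pyGetD row j 0) then [(i, j)] else [])
      = (PySem.List.enumerate (PySem.List.slice row none (some cols))).filterMap (fun jv =>
          if p jv.2 then some (i, jv.1) else none) := by
  rw [PySem.List.slice_to row hc0]
  have hlen : (PySem.List.len (List.take cols.toNat row) : Int) = cols := by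
    simp [PySem.List.len]; omega
  refine Eq.trans ?_ (pv_filterMap_eq_flatMap (fun jv => p jv.2)
    (fun jv => (i, jv.1)) (PySem.List.enumerate (List.take cols.toNat row))).symm
  refine Eq.trans ?_ (pv_flatMap_enum0 (List.take cols.toNat row) 0
    (fun j v => if p v then [(i, j)] else []))
  rw [hlen]
  apply pv_flatMap_congr_mem
  intro j hj
  have hj' := PySem.List.mem_pyRange_one.mp hj
  have hget : PySem.List.pyGetD (List.take cols.toNat row) j 0 = PySem.List.pyGetD row j 0 := by
    rw [PySem.List.pyGetD_of_nonneg _ _ (by omega), PySem.List.pyGetD_of_nonneg _ _ (by omega)]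
    rw [List.getD_eq_getElem?_getD, List.getD_eq_getElem?_getD]
    rw [List.getElem?_take]
    simp only [if_pos (by omega : j.toNat < cols.toNat)]
  simp only [hget]

theorem pv_cells_eq (grid : List (List Int)) (p : Int → Bool) (cols : Int)
    (hc0 : 0 ≤ cols) (hc : ∀ row ∈ grid, cols ≤ (row.length : Int)) :
    pvCellsR grid p (PySem.List.len grid) cols = pvCellsP grid p cols := by
  unfold pvCellsR pvCellsP
  refine Eq.trans (pv_flatMap_enum0 grid [] (fun i row =>
    (PySem.List.pyRange 0 cols).flatMap (fun j =>
      if p (PySem.List.pyGetD row j 0) then [(i, j)] else []))) ?_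
  apply pv_flatMap_congr_mem
  intro q hq
  have hrow : q.2 ∈ grid := by
    have := List.mem_map_of_mem (f := fun z => (z : Int × List Int).2) hq
    rwa [PySem.List.map_snd_enumerate] at this
  exact pv_row_eq q.2 p cols q.1 hc0 (hc q.2 hrow)

theorem pv_mem_cellsP (grid : List (List Int)) (p : Int → Bool) (cols : Int) (u v : Int)
    (hc0 : 0 ≤ cols) (hc : ∀ row ∈ grid, cols ≤ (row.length : Int)) :
    ((u, v) ∈ pvCellsP grid p cols ↔
      0 ≤ u ∧ u < PySem.List.len grid ∧ 0 ≤ v ∧ v < cols ∧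
        p (PySem.List.pyGetD (PySem.List.pyGetD grid u []) v 0) = true) := by
  rw [← pv_cells_eq grid p cols hc0 hc]
  unfold pvCellsR
  simp only [List.mem_flatMap, PySem.List.mem_pyRange_one]
  constructor
  · rintro ⟨i, hi, j, hj, hm⟩
    by_cases hcell : p (PySem.List.pyGetD (PySem.List.pyGetD grid i []) j 0)
    · rw [if_pos hcell] at hm
      simp only [List.mem_singleton, Prod.mk.injEq] at hm
      obtain ⟨h1, h2⟩ := hm
      subst h1; subst h2
      exact ⟨hi.1, hi.2, hj.1, hj.2, hcell⟩
    · rw [if_neg hcell] at hm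
      exact absurd hm (List.not_mem_nil)
  · rintro ⟨h1, h2, h3, h4, h5⟩
    exact ⟨u, ⟨h1, h2⟩, v, ⟨h3, h4⟩, by simp [h5]⟩

-- A's inline open / edge-touch tests, named for the proofs
def pvOpenE (grid : List (List Int)) (rows cols : Int) (dd : Int × Int) : Bool :=
  (decide (dd.1 < 0) || decide (dd.2 < 0) || decide (rows ≤ dd.1) || decide (cols ≤ dd.2))
    || (PySem.List.pyGetD (PySem.List.pyGetD grid dd.1 []) dd.2 0 == 0)

def pvTouchE (grid : List (List Int)) (player_id rows cols : Int) (dd : Int × Int) : Bool :=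
  [((0:Int), (1:Int)), (1, 0), (0, -1), (-1, 0)].any (fun dd2 =>
    !(decide (dd.1 + dd2.1 < 0) || decide (dd.2 + dd2.2 < 0)
        || decide (rows ≤ dd.1 + dd2.1) || decide (cols ≤ dd.2 + dd2.2))
    && (PySem.List.pyGetD (PySem.List.pyGetD grid (dd.1 + dd2.1) []) (dd.2 + dd2.2) 0 == player_id))

-- B's occupied set decides exactly A's inline open test
theorem pv_open_eq (grid : List (List Int)) (cols : Int) (z : Int × Int)
    (hc0 : 0 ≤ cols) (hc : ∀ row ∈ grid, cols ≤ (row.length : Int)) :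
    (!((PySem.Set.ofList (pvCellsP grid (fun v => !(v == 0)) cols)).contains z))
      = pvOpenE grid (PySem.List.len grid) cols z := by
  have hm : ((PySem.Set.ofList (pvCellsP grid (fun v => !(v == 0)) cols)).contains z = true) ↔
      (0 ≤ z.1 ∧ z.1 < PySem.List.len grid ∧ 0 ≤ z.2 ∧ z.2 < cols ∧
        ¬ (PySem.List.pyGetD (PySem.List.pyGetD grid z.1 []) z.2 0 = 0)) := by
    rw [PySem.Set.contains_iff, PySem.Set.mem_ofList,
      pv_mem_cellsP grid _ cols z.1 z.2 hc0 hc]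
    simp
  have h2 : (pvOpenE grid (PySem.List.len grid) cols z = true) ↔
      ¬ ((PySem.Set.ofList (pvCellsP grid (fun v => !(v == 0)) cols)).contains z = true) := by
    rw [hm]
    unfold pvOpenE
    simp only [Bool.or_eq_true, decide_eq_true_eq, beq_iff_eq, not_and, not_not]
    constructor
    · intro h h1 h2' h3 h4
      omega
    · intro h
      by_cases h1 : z.1 < 0; · tauto
      by_cases h2' : z.2 < 0; · tauto
      by_cases h3 : PySem.List.len grid ≤ z.1; · tauto
      by_cases h4 : cols ≤ z.2; · tauto
      right
      exact h (by omega) (by omega) (by omega) (by omega)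
  rcases Bool.eq_false_or_eq_true
      ((PySem.Set.ofList (pvCellsP grid (fun v => !(v == 0)) cols)).contains z) with hcon | hcon <;>
    rw [hcon] <;> rw [hcon] at h2 <;> simp at h2 <;> simp [h2]

-- B's blocked set (players dilated by the orthogonal cross) decides exactly A's edge-touch scan
theorem pv_blk_eq (grid : List (List Int)) (player_id cols : Int) (z : Int × Int)
    (hc0 : 0 ≤ cols) (hc : ∀ row ∈ grid, cols ≤ (row.length : Int)) :
    (PySem.Set.ofList ((pvCellsP grid (fun v => v == player_id) cols).flatMap (fun ij =>
        [((0:Int), (1:Int)), (1, 0), (0, -1), (-1, 0)].map (fun ab => (ij.1 + ab.1, ij.2 + ab.2))))).contains z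
      = pvTouchE grid player_id (PySem.List.len grid) cols z := by
  obtain ⟨zx, zy⟩ := z
  rw [Bool.eq_iff_iff]
  rw [PySem.Set.contains_iff, PySem.Set.mem_ofList]
  have hmem : ∀ u v : Int, ((u, v) ∈ pvCellsP grid (fun x => x == player_id) cols ↔
      0 ≤ u ∧ u < PySem.List.len grid ∧ 0 ≤ v ∧ v < cols ∧
        PySem.List.pyGetD (PySem.List.pyGetD grid u []) v 0 = player_id) := by
    intro u v
    rw [pv_mem_cellsP grid _ cols u v hc0 hc]
    simp only [beq_iff_eq]
  unfold pvTouchE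
  simp only [List.mem_flatMap, List.mem_map, List.mem_cons, List.not_mem_nil, or_false,
    List.any_cons, List.any_nil, Bool.or_false, Bool.or_eq_true, Bool.and_eq_true,
    Bool.not_eq_true', Bool.or_eq_false_iff, decide_eq_false_iff_not, beq_iff_eq, not_lt, not_le]
  constructor
  · rintro ⟨p, hp, ab, hab, hz⟩
    rw [hmem p.1 p.2] at hp
    obtain ⟨h1, h2, h3, h4, h5⟩ := hp
    injection hz with hz1 hz2
    subst hz1; subst hz2
    rcases hab with rfl | rfl | rfl | rfl <;>
      [ (right; right; left; refine ⟨⟨⟨⟨?_, ?_⟩, ?_⟩, ?_⟩, ?_⟩)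
      ; (right; right; right; refine ⟨⟨⟨⟨?_, ?_⟩, ?_⟩, ?_⟩, ?_⟩)
      ; (left; refine ⟨⟨⟨⟨?_, ?_⟩, ?_⟩, ?_⟩, ?_⟩)
      ; (right; left; refine ⟨⟨⟨⟨?_, ?_⟩, ?_⟩, ?_⟩, ?_⟩) ] <;>
      first
        | omega
        | (convert h5 using 3 <;> omega)
  · intro h
    rcases h with ⟨⟨⟨⟨h1, h3⟩, h2⟩, h4⟩, h5⟩ | ⟨⟨⟨⟨h1, h3⟩, h2⟩, h4⟩, h5⟩
        | ⟨⟨⟨⟨h1, h3⟩, h2⟩, h4⟩, h5⟩ | ⟨⟨⟨⟨h1, h3⟩, h2⟩, h4⟩, h5⟩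
    · exact ⟨(zx + 0, zy + 1), (hmem _ _).mpr ⟨h1, h2, h3, h4, h5⟩,
        (0, -1), by simp, by simp only [Prod.mk.injEq]; omega⟩
    · exact ⟨(zx + 1, zy + 0), (hmem _ _).mpr ⟨h1, h2, h3, h4, h5⟩,
        (-1, 0), by simp, by simp only [Prod.mk.injEq]; omega⟩
    · exact ⟨(zx + 0, zy + -1), (hmem _ _).mpr ⟨h1, h2, h3, h4, h5⟩,
        (0, 1), by simp, by simp only [Prod.mk.injEq]; omega⟩
    · exact ⟨(zx + -1, zy + 0), (hmem _ _).mpr ⟨h1, h2, h3, h4, h5⟩,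
        (1, 0), by simp, by simp only [Prod.mk.injEq]; omega⟩

def pvD (grid : List (List Int)) (player_id rows cols i j : Int) : List (Int × Int) :=
  [(i-1, j-1), (i-1, j+1), (i+1, j-1), (i+1, j+1)].filter
    (fun dd => pvOpenE grid rows cols dd && !pvTouchE grid player_id rows cols dd)

theorem pv_flatMap_assoc {α β γ : Type} (l : List α) (f : α → List β) (g : β → List γ) :
    (l.flatMap f).flatMap g = l.flatMap (fun x => (f x).flatMap g) := by
  induction l with
  | nil => rfl
  | cons x xs ih => simp [List.flatMap_cons, List.flatMap_append, ih]

theorem pv_shift (i j : Int) :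
    [((-1:Int), (-1:Int)), (-1, 1), (1, -1), (1, 1)].map (fun ab => (i + ab.1, j + ab.2))
      = [(i-1, j-1), (i-1, j+1), (i+1, j-1), (i+1, j+1)] := by
  simp only [List.map_cons, List.map_nil, Prod.mk.injEq, List.cons.injEq, and_true, true_and]
  omega

theorem pv_cond_fold {α β : Type} (C : α → Bool) (G : α → List β) (l : List α) (acc : List β) :
    l.foldl (fun acc x => if C x then acc ++ G x else acc) acc
      = acc ++ l.flatMap (fun x => if C x then G x else []) := by
  refine Eq.trans (PySem.List.foldl_congr_mem l _ (fun acc x => acc ++ (if C x then G x else [])) acc ?_)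
    (PySem.List.foldl_append_eq_flatMap _ l acc)
  intro a x _
  by_cases h : C x <;> simp [h]

theorem pv_diag_fold {α : Type} (P Q : α → Bool) (l : List α) (acc : List α) :
    l.foldl (fun acc dd => if P dd then (if !Q dd then acc ++ [dd] else acc) else acc) acc
      = acc ++ l.filter (fun dd => P dd && !Q dd) := by
  refine Eq.trans (PySem.List.foldl_congr_mem l _ (fun acc dd => if (P dd && !Q dd) then acc ++ [dd] else acc) acc ?_) ?_
  · intro a x _
    by_cases h1 : P x <;> by_cases h2 : Q x <;> simp [h1, h2]
  · refine Eq.trans (PySem.List.foldl_append_if _ id l acc) (by simp)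

theorem pv_filter_fold (cond : Int × Int → Bool) (cp : List (Int × Int)) :
    (PySem.List.pyRange 0 (PySem.List.len cp)).foldl (fun acc k =>
      if cond (PySem.List.pyGetD cp k ((0:Int), (0:Int))) then
        acc ++ [PySem.List.pyGetD cp k ((0:Int), (0:Int))]
      else acc) []
    = cp.filter cond := by
  refine Eq.trans (PySem.List.foldl_pyRange_zero_pyGetD cp ((0:Int), (0:Int))
    (fun acc p => if cond p then acc ++ [p] else acc) []) ?_
  refine Eq.trans (PySem.List.foldl_append_if cond id cp []) ?_
  simp

-- B's emission for one player cell = A's filtered diagonal list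
theorem pv_emit_eq (grid : List (List Int)) (player_id cols : Int) (c : Int × Int)
    (hc0 : 0 ≤ cols) (hc : ∀ row ∈ grid, cols ≤ (row.length : Int)) :
    [((-1:Int), (-1:Int)), (-1, 1), (1, -1), (1, 1)].filterMap (fun ab =>
        if !((PySem.Set.ofList (pvCellsP grid (fun v => !(v == 0)) cols)).contains (c.1 + ab.1, c.2 + ab.2))
            && !((PySem.Set.ofList ((pvCellsP grid (fun v => v == player_id) cols).flatMap (fun ij =>
                [((0:Int), (1:Int)), (1, 0), (0, -1), (-1, 0)].map (fun ab => (ij.1 + ab.1, ij.2 + ab.2))))).contains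
                (c.1 + ab.1, c.2 + ab.2)) then
          some (c.1 + ab.1, c.2 + ab.2)
        else none)
      = pvD grid player_id (PySem.List.len grid) cols c.1 c.2 := by
  refine Eq.trans (Eq.symm (List.filterMap_map
    (f := fun ab : Int × Int => (c.1 + ab.1, c.2 + ab.2))
    (g := fun z : Int × Int =>
      if !((PySem.Set.ofList (pvCellsP grid (fun v => !(v == 0)) cols)).contains z)
          && !((PySem.Set.ofList ((pvCellsP grid (fun v => v == player_id) cols).flatMap (fun ij =>
              [((0:Int), (1:Int)), (1, 0), (0, -1), (-1, 0)].map (fun ab => (ij.1 + ab.1, ij.2 + ab.2))))).contains z)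
        then some z else none)
    (l := [((-1:Int), (-1:Int)), (-1, 1), (1, -1), (1, 1)]))) ?_
  rw [pv_shift c.1 c.2]
  refine Eq.trans (pv_filterMap_filter _ _) ?_
  unfold pvD
  apply List.filter_congr
  intro z _
  rw [pv_open_eq grid cols z hc0 hc, pv_blk_eq grid player_id cols z hc0 hc]

set_option maxHeartbeats 4000000 in
theorem pv_streamA_eq (grid : List (List Int)) (player_id cols : Int)
    (hc0 : 0 ≤ cols) (hc : ∀ row ∈ grid, cols ≤ (row.length : Int)) :
    (PySem.List.pyRange 0 (PySem.List.len grid)).foldl (fun acc i =>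
      (PySem.List.pyRange 0 cols).foldl (fun acc j =>
        if PySem.List.pyGetD (PySem.List.pyGetD grid i []) j 0 == player_id then
          [(i-1, j-1), (i-1, j+1), (i+1, j-1), (i+1, j+1)].foldl (fun acc dd =>
            if pvOpenE grid (PySem.List.len grid) cols dd then
              (if !(pvTouchE grid player_id (PySem.List.len grid) cols dd) then acc ++ [dd] else acc)
            else acc) acc
        else acc) acc) []
    = (pvCellsP grid (fun v => v == player_id) cols).flatMap (fun ij =>
        [((-1:Int), (-1:Int)), (-1, 1), (1, -1), (1, 1)].filterMap (fun ab =>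
          if !((PySem.Set.ofList (pvCellsP grid (fun v => !(v == 0)) cols)).contains (ij.1 + ab.1, ij.2 + ab.2))
              && !((PySem.Set.ofList ((pvCellsP grid (fun v => v == player_id) cols).flatMap (fun ij =>
                  [((0:Int), (1:Int)), (1, 0), (0, -1), (-1, 0)].map (fun ab => (ij.1 + ab.1, ij.2 + ab.2))))).contains
                  (ij.1 + ab.1, ij.2 + ab.2)) then
            some (ij.1 + ab.1, ij.2 + ab.2)
          else none)) := by
  refine Eq.trans (PySem.List.foldl_congr_mem _ _ (fun acc i =>
    acc ++ (PySem.List.pyRange 0 cols).flatMap (fun j =>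
      if PySem.List.pyGetD (PySem.List.pyGetD grid i []) j 0 == player_id then
        pvD grid player_id (PySem.List.len grid) cols i j else [])) [] ?_) ?_
  · intro acc i _
    refine Eq.trans (PySem.List.foldl_congr_mem _ _ (fun acc j =>
      if PySem.List.pyGetD (PySem.List.pyGetD grid i []) j 0 == player_id then
        acc ++ pvD grid player_id (PySem.List.len grid) cols i j else acc) acc ?_) (pv_cond_fold _ _ _ acc)
    intro acc' j _
    by_cases h : PySem.List.pyGetD (PySem.List.pyGetD grid i []) j 0 == player_id
    · simp only [if_pos h]
      exact pv_diag_fold (pvOpenE grid (PySem.List.len grid) cols)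
        (pvTouchE grid player_id (PySem.List.len grid) cols) _ acc'
    · simp only [if_neg h]
  · refine Eq.trans (PySem.List.foldl_append_eq_flatMap _ _ []) ?_
    rw [List.nil_append]
    refine Eq.trans (pv_flatMap_congr_mem _ _ (fun i =>
      ((PySem.List.pyRange 0 cols).flatMap (fun j =>
        if PySem.List.pyGetD (PySem.List.pyGetD grid i []) j 0 == player_id then [(i, j)] else [])).flatMap
          (fun c => pvD grid player_id (PySem.List.len grid) cols c.1 c.2)) ?_) ?_
    · intro i _
      exact pv_tag _ (fun j => (i, j))
        (fun c => pvD grid player_id (PySem.List.len grid) cols c.1 c.2) _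
    · rw [← pv_flatMap_assoc]
      have h := pv_cells_eq grid (fun v => v == player_id) cols hc0 hc
      unfold pvCellsR at h
      rw [h]
      apply pv_flatMap_congr_mem
      intro c _
      exact (pv_emit_eq grid player_id cols c hc0 hc).symm

-- ===== VERDICT (by name: the statement is the Claim_ definition above) =====
set_option maxHeartbeats 4000000 in
theorem identify_corners_positions_spec : Claim_equal_identify_corners_positions := by
  intro grid player_id coe hdom hpre
  obtain ⟨hne, hrow⟩ := hpre
  have hc0 : (0:Int) ≤ PySem.List.len (PySem.List.pyGetD grid 0 []) := by
    simp [PySem.List.len]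
  have hc : ∀ row ∈ grid, PySem.List.len (PySem.List.pyGetD grid 0 []) ≤ (row.length : Int) := by
    intro r hr
    have h := hrow r hr
    simp only [PySem.List.len_eq]
    exact_mod_cast h
  unfold Spec_identify_corners_positions identify_corners_positions identify_corners_positions_alt
  dsimp only
  have hs := pv_streamA_eq grid player_id (PySem.List.len (PySem.List.pyGetD grid 0 [])) hc0 hc
  apply congrArg
  cases coe with
  | true =>
    simp only [Bool.not_true, Bool.false_eq_true, if_false]
    exact hs
  | false =>
    simp only [Bool.not_false, if_true]
    exact Eq.trans (pv_filter_fold (fun p => decide (0 ≤ p.1) && decide (0 ≤ p.2)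
        && decide (p.1 < PySem.List.len grid)
        && decide (p.2 < PySem.List.len (PySem.List.pyGetD grid 0 []))) _)
      (congrArg (List.filter _) hs)
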